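-- pv_equiv track=rewrite | github.com/totallyhuman/advent-of-code-2022 | 17.py | part2
-- ===== SOURCE A (Python) =====
-- def collides(c, rl, rp):
--     for i, rr in enumerate(rl, start = rp):
--         if i < len(c) and c[i] & rr:
--             return True
--
--     return False
--
-- def part2(x):
--     # build up: 175 rocks
--     # loop: every 1730 rocks
--
--     br = 175
--     lr = 1730
--     nl, re = divmod(1000000000000 - br, lr)
--
--     c = [127]
--     xi = 0
--
--     for r in range(br + lr + re):
--         c += [0, 0, 0]
--
--         match r % 5:
--             case 0:
--                 rl = [30]
--             case 1:
--                 rl = [8, 28, 8]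
--             case 2:
--                 rl = [28, 4, 4]
--             case 3:
--                 rl = [16, 16, 16, 16]
--             case 4:
--                 rl = [24, 24]
--
--         rp = len(c)
--         f = True
--
--         while f:
--             match x[xi % len(x)]:
--                 case '<':
--                     rl_ = [i << 1 for i in rl]
--
--                     if not any(rr & 64 for rr in rl) and not collides(c, rl_, rp):
--                         rl = rl_
--                 case '>':
--                     rl_ = [i >> 1 for i in rl]
--
--                     if not any(rr & 1 for rr in rl) and not collides(c, rl_, rp):
--                         rl = [i >> 1 for i in rl]
--
--             xi += 1
--
--             if collides(c, rl, rp - 1):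
--                 f = False
--                 break
--             else:
--                 rp -= 1
--
--         for i, rr in enumerate(rl, start = rp):
--             if i < len(c):
--                 c[i] |= rr
--             else:
--                 c.append(rr)
--
--         c = [i for i in c if i]
--
--         if r == br - 1:
--             b = len(c) - 1
--
--         if r == br + lr - 1:
--             l = len(c) - 1 - b
--
--         if r == br + lr + re - 1:
--             o = len(c) - 1 - l - b
--
--     return b + (l * nl) + o
-- ===== SOURCE B (Python) =====
-- # Chamber and rock each kept as ONE arbitrary-precision integer bitboard (7 bits per row,
-- # row i = bits 7i..7i+6, floor = 127): jets, collision and settling are single whole-integer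
-- # AND/OR/shift operations against precomputed wall masks, so A's per-row collision scan,
-- # per-row shift comprehensions, trim pass and list bookkeeping all disappear; the tower
-- # height is a plain counter updated when a rock settles.
--
-- # the five rock shapes as bitboard integers (row k of shape = bits 7k..7k+6), and their heights
-- SHAPES = [30, 134664, 66076, 33818640, 3096]
-- ROWS = [1, 3, 3, 4, 2]
-- WALL_L = 135274560  # bit 6 of rows 0..3: a shape touching the left wall
-- WALL_R = 2113665    # bit 0 of rows 0..3: a shape touching the right wall
--
--
-- def part2(x):
--     br = 175
--     lr = 1730
--     nl, re = divmod(1000000000000 - br, lr)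
--
--     C = 127     # board: floor row only
--     h = 1       # number of occupied rows (floor included)
--     xi = 0
--     b = l = o = 0
--
--     for r in range(br + lr + re):
--         s = SHAPES[r % 5]
--         rows = ROWS[r % 5]
--         rp = h + 3  # row of the shape's bottom
--
--         while True:
--             jet = x[xi % len(x)]
--             xi += 1
--
--             if jet == '<':
--                 if not s & WALL_L and not C & (s << 1 << 7 * rp):
--                     s <<= 1
--             elif jet == '>':
--                 if not s & WALL_R and not C & (s >> 1 << 7 * rp):
--                     s >>= 1
--
--             if C & (s << 7 * (rp - 1)):
--                 break
--             rp -= 1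
--
--         C |= s << 7 * rp
--         h = max(h, rp + rows)
--
--         if r == br - 1:
--             b = h - 1
--         if r == br + lr - 1:
--             l = h - 1 - b
--         if r == br + lr + re - 1:
--             o = h - 1 - l - b
--
--     return b + l * nl + o
-- ===== Notes on version B (the rewrite author's own statement) =====
-- stated objective: faster
-- what changed: A keeps the chamber as a Python list of 7-bit row masks and the falling rock as a list of row masks, with an inner per-row collision scan (collides), per-row list comprehensions for the jet shifts, an O(height) trim pass after every rock and len() bookkeeping; B packs the whole chamber and the whole rock each into ONE arbitrary-precision bitboard integer (7 bits per row), so collision, jet legality and settling are each a single integer AND/OR/shift against precomputed wall masks, the trim pass disappears, and the height is a plain counter.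
import Mathlib
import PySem

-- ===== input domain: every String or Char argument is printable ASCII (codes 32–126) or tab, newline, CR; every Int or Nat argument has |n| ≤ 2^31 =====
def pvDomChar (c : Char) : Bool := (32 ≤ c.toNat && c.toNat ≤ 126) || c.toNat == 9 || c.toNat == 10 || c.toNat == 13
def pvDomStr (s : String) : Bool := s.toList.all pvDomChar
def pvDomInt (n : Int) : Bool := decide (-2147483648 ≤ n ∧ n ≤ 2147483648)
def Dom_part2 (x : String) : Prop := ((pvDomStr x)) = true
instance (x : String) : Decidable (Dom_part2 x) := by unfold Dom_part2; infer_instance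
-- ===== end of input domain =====

-- B replaces A's chamber (a Python list of 7-bit row masks, scanned row by row) by ONE
-- arbitrary-precision bitboard integer: collision / jet / settle become single whole-integer
-- AND/OR/shift operations, A's per-row collision scan, per-row shift comprehensions and
-- trim pass disappear, and the height is a plain counter ("faster" in a timing run).
-- All Python ints in both programs are nonnegative row masks / bitboards; they are ported
-- as Nat, whose &&&, |||, <<<, >>> are Python-exact on nonnegative ints.

-- ===== PORT A =====
-- Python lists indexed in O(1) are ported as Array (same values).
def collidesA (c : Array Nat) (rl : List Nat) (i : Nat) : Bool :=
  match rl with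
  | [] => false
  | rr :: rest =>
    if i < c.size ∧ c.getD i 0 &&& rr ≠ 0 then true
    else collidesA c rest (i + 1)

def rockA (r : Nat) : List Nat :=
  match r % 5 with
  | 0 => [30]
  | 1 => [8, 28, 8]
  | 2 => [28, 4, 4]
  | 3 => [16, 16, 16, 16]
  | _ => [24, 24]

-- the 'while f' fall loop; structural recursion on rp (Python's rp strictly decreases; the
-- rp = 0 case is unreachable on real executions: the floor row 127 stops every fall at rp ≥ 1)
def fallA (x : Array Char) (c : Array Nat) (rl : List Nat) (rp xi : Nat) :
    List Nat × Nat × Nat :=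
  let ch := x.getD (xi % x.size) ' '
  let rl1 :=
    if ch = '<' then
      let rl_ := rl.map (· <<< 1)
      if (¬ (rl.any fun rr => rr &&& 64 ≠ 0) = true) ∧ ¬ collidesA c rl_ rp = true then rl_
      else rl
    else if ch = '>' then
      let rl_ := rl.map (· >>> 1)
      if (¬ (rl.any fun rr => rr &&& 1 ≠ 0) = true) ∧ ¬ collidesA c rl_ rp = true then
        rl.map (· >>> 1)
      else rl
    else rl
  match rp with
  | 0 => (rl1, 0, xi + 1)
  | rp' + 1 =>
    if collidesA c rl1 rp' then (rl1, rp' + 1, xi + 1) else fallA x c rl1 rp' (xi + 1)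

def settleA (c : Array Nat) (rl : List Nat) (i : Nat) : Array Nat :=
  match rl with
  | [] => c
  | rr :: rest =>
    if i < c.size then settleA (c.set! i (c.getD i 0 ||| rr)) rest (i + 1)
    else settleA (c.push rr) rest (i + 1)

def stepA (x : Array Char) (br lr re : Int) (st : Array Nat × Nat × Int × Int × Int)
    (r : Nat) : Array Nat × Nat × Int × Int × Int :=
  match st with
  | (c0, xi0, b0, l0, o0) =>
    let c1 := c0 ++ #[0, 0, 0]
    let fr := fallA x c1 (rockA r) c1.size xi0
    let c2 := settleA c1 fr.1 fr.2.1
    let c3 := c2.filter (fun v => decide (v ≠ 0))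
    let b1 := if (r : Int) = br - 1 then (c3.size : Int) - 1 else b0
    let l1 := if (r : Int) = br + lr - 1 then (c3.size : Int) - 1 - b1 else l0
    let o1 := if (r : Int) = br + lr + re - 1 then (c3.size : Int) - 1 - l1 - b1 else o0
    (c3, fr.2.2, b1, l1, o1)

def part2 (x : String) : Int :=
  let br : Int := 175
  let lr : Int := 1730
  let nl := PySem.Int.floordiv (1000000000000 - br) lr
  let re := PySem.Int.mod (1000000000000 - br) lr
  let xs := x.toList.toArray
  let st := (List.range (br + lr + re).toNat).foldl (stepA xs br lr re) (#[127], 0, 0, 0, 0)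
  st.2.2.1 + st.2.2.2.1 * nl + st.2.2.2.2

-- ===== PORT B =====
def shapesB : List Nat := [30, 134664, 66076, 33818640, 3096]
def rowsB : List Nat := [1, 3, 3, 4, 2]
def wallL : Nat := 135274560
def wallR : Nat := 2113665

-- the 'while True' fall loop of Source B; structural recursion on rp (strictly decreasing; the
-- rp = 0 case is unreachable on real executions: the floor stops every fall at rp ≥ 1)
def fallB (x : Array Char) (C s : Nat) (rp xi : Nat) : Nat × Nat × Nat :=
  let jet := x.getD (xi % x.size) ' '
  let s1 :=
    if jet = '<' then
      if s &&& wallL = 0 ∧ C &&& (s <<< 1 <<< (7 * rp)) = 0 then s <<< 1 else s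
    else if jet = '>' then
      if s &&& wallR = 0 ∧ C &&& (s >>> 1 <<< (7 * rp)) = 0 then s >>> 1 else s
    else s
  match rp with
  | 0 => (s1, 0, xi + 1)
  | rp' + 1 =>
    if C &&& (s1 <<< (7 * rp')) ≠ 0 then (s1, rp' + 1, xi + 1) else fallB x C s1 rp' (xi + 1)

def stepB (x : Array Char) (br lr re : Int) (st : Nat × Nat × Nat × Int × Int × Int)
    (r : Nat) : Nat × Nat × Nat × Int × Int × Int :=
  match st with
  | (c0, h0, xi0, b0, l0, o0) =>
    let s := shapesB.getD (r % 5) 0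
    let rows := rowsB.getD (r % 5) 0
    let fr := fallB x c0 s (h0 + 3) xi0
    let c1 := c0 ||| (fr.1 <<< (7 * fr.2.1))
    let h1 := max h0 (fr.2.1 + rows)
    let b1 := if (r : Int) = br - 1 then (h1 : Int) - 1 else b0
    let l1 := if (r : Int) = br + lr - 1 then (h1 : Int) - 1 - b1 else l0
    let o1 := if (r : Int) = br + lr + re - 1 then (h1 : Int) - 1 - l1 - b1 else o0
    (c1, h1, fr.2.2, b1, l1, o1)

def part2_alt (x : String) : Int :=
  let br : Int := 175
  let lr : Int := 1730
  let nl := PySem.Int.floordiv (1000000000000 - br) lr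
  let re := PySem.Int.mod (1000000000000 - br) lr
  let xs := x.toList.toArray
  let st := (List.range (br + lr + re).toNat).foldl (stepB xs br lr re) (127, 1, 0, 0, 0, 0)
  st.2.2.2.1 + st.2.2.2.2.1 * nl + st.2.2.2.2.2

-- ===== PRECONDITION & SPEC =====
-- Pre_ excludes only the empty string, on which the Python A (and B) raise
-- ZeroDivisionError at x[xi % len(x)].
def Pre_part2 (x : String) : Prop := x ≠ ""
instance (x : String) : Decidable (Pre_part2 x) := by unfold Pre_part2; infer_instance
def pvWitness_part2 : String := "><"

def Spec_part2 (x : String) (out : Int) : Prop := out = part2_alt x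
instance (x : String) (out : Int) : Decidable (Spec_part2 x out) := by
  unfold Spec_part2; infer_instance

-- ===== CLAIM (what is proved, stated in full; the proofs are below) =====
def Claim_equal_part2 : Prop := ∀ (x : String), Dom_part2 x → Pre_part2 x → Spec_part2 x (part2 x)

-- ===== LEMMAS AND PROOFS =====

-- The chamber digits: A's trimmed list of row masks is the base-128 digit expansion of
-- B's bitboard integer, read through encR.
def encR : List Nat → Nat
  | [] => 0
  | d :: ds => d + 128 * encR ds

-- row-wise union with the longer tail kept (what settling a rock does to the row list)
def orMerge : List Nat → List Nat → List Nat
  | [], es => es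
  | d :: ds, [] => d :: ds
  | d :: ds, e :: es => (d ||| e) :: orMerge ds es

def ChInv (c : Array Nat) (C h : Nat) : Prop :=
  C = encR c.toList ∧ h = c.toList.length ∧
  (∀ d ∈ c.toList, 1 ≤ d ∧ d < 128) ∧ c.toList.getD 0 0 = 127

def RockInv (L : Nat) (rl : List Nat) (s : Nat) : Prop :=
  s = encR rl ∧ rl.length = L ∧ 1 ≤ L ∧ L ≤ 4 ∧ ∀ d ∈ rl, 1 ≤ d ∧ d < 128

def SimInv (stA : Array Nat × Nat × Int × Int × Int)
    (stB : Nat × Nat × Nat × Int × Int × Int) : Prop :=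
  ChInv stA.1 stB.1 stB.2.1 ∧ stA.2.1 = stB.2.2.1 ∧ stA.2.2.1 = stB.2.2.2.1 ∧
  stA.2.2.2.1 = stB.2.2.2.2.1 ∧ stA.2.2.2.2 = stB.2.2.2.2.2

-- ---- base-128 digit arithmetic ----
theorem digit_split_land {m x y a b : Nat} (hx : x < 2 ^ m) (hy : y < 2 ^ m) :
    (x + 2 ^ m * a) &&& (y + 2 ^ m * b) = (x &&& y) + 2 ^ m * (a &&& b) := by
  have hxy : x &&& y < 2 ^ m := lt_of_le_of_lt Nat.and_le_left hx
  apply Nat.eq_of_testBit_eq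
  intro i
  rw [Nat.add_comm x, Nat.add_comm y, Nat.add_comm (x &&& y), Nat.testBit_land,
    Nat.testBit_two_pow_mul_add _ hx, Nat.testBit_two_pow_mul_add _ hy,
    Nat.testBit_two_pow_mul_add _ hxy]
  by_cases h : i < m
  · simp [h, Nat.testBit_land]
  · simp [h, Nat.testBit_land]
theorem digit_split_lor {m x y a b : Nat} (hx : x < 2 ^ m) (hy : y < 2 ^ m) :
    (x + 2 ^ m * a) ||| (y + 2 ^ m * b) = (x ||| y) + 2 ^ m * (a ||| b) := by
  have hxy : x ||| y < 2 ^ m := Nat.or_lt_two_pow hx hy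
  apply Nat.eq_of_testBit_eq
  intro i
  rw [Nat.add_comm x, Nat.add_comm y, Nat.add_comm (x ||| y), Nat.testBit_lor,
    Nat.testBit_two_pow_mul_add _ hx, Nat.testBit_two_pow_mul_add _ hy,
    Nat.testBit_two_pow_mul_add _ hxy]
  by_cases h : i < m
  · simp [h, Nat.testBit_lor]
  · simp [h, Nat.testBit_lor]
theorem pow128_eq (n : Nat) : (128 : Nat) ^ n = 2 ^ (7 * n) := by
  have : (128 : Nat) = 2 ^ 7 := by norm_num
  rw [this, ← pow_mul]
theorem encR_lt {ds : List Nat} (h : ∀ d ∈ ds, d < 128) : encR ds < 128 ^ ds.length := by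
  induction ds with
  | nil => simp [encR]
  | cons d ds ih =>
    have hd := h d (by simp)
    have he := ih (fun e he => h e (by simp [he]))
    simp only [encR, List.length_cons, pow_succ]
    calc d + 128 * encR ds < 128 + 128 * encR ds := by omega
    _ ≤ 128 * 128 ^ ds.length := by nlinarith
    _ = 128 ^ ds.length * 128 := by ring
theorem encR_eq_zero_iff (ds : List Nat) : encR ds = 0 ↔ ∀ d ∈ ds, d = 0 := by
  induction ds with
  | nil => simp [encR]
  | cons d ds ih =>
    simp only [encR, List.mem_cons, Nat.add_eq_zero, Nat.mul_eq_zero]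
    constructor
    · rintro ⟨h1, h2⟩ e he
      rcases he with rfl | he
      · exact h1
      · exact (ih.mp (by omega)) e he
    · intro h
      refine ⟨h d (Or.inl rfl), Or.inr (ih.mpr fun e he => h e (Or.inr he))⟩
theorem encR_append (ds es : List Nat) :
    encR (ds ++ es) = encR ds + 128 ^ ds.length * encR es := by
  induction ds with
  | nil => simp [encR]
  | cons d ds ih => simp [encR, ih, pow_succ]; ring
theorem land_encR {ds : List Nat} : ∀ {es : List Nat}, (∀ d ∈ ds, d < 128) → (∀ d ∈ es, d < 128) →
    encR ds &&& encR es = encR (List.zipWith (· &&& ·) ds es) := by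
  induction ds with
  | nil => intro es _ _; simp [encR]
  | cons d ds ih =>
    intro es hds hes
    cases es with
    | nil => simp [encR]
    | cons e es =>
      have h128 : (128 : Nat) = 2 ^ 7 := by norm_num
      simp only [encR, List.zipWith_cons_cons]
      rw [h128, digit_split_land (by have := hds d (by simp); omega) (by have := hes e (by simp); omega),
        ih (fun v hv => hds v (by simp [hv])) (fun v hv => hes v (by simp [hv]))]
theorem lor_orMerge : ∀ {ds es : List Nat}, (∀ d ∈ ds, d < 128) → (∀ d ∈ es, d < 128) →
    encR ds ||| encR es = encR (orMerge ds es)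
  | [], es, _, _ => by simp [encR, orMerge]
  | d :: ds, [], _, _ => by simp [encR, orMerge]
  | d :: ds, e :: es, hds, hes => by
    have h128 : (128 : Nat) = 2 ^ 7 := by norm_num
    simp only [encR, orMerge]
    rw [h128, digit_split_lor (by have := hds d (by simp); omega) (by have := hes e (by simp); omega),
      lor_orMerge (fun v hv => hds v (by simp [hv])) (fun v hv => hes v (by simp [hv]))]
theorem encR_double (ds : List Nat) : encR (ds.map (· <<< 1)) = encR ds <<< 1 := by
  induction ds with
  | nil => simp [encR]
  | cons d ds ih =>
    simp only [List.map_cons, encR, ih]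
    simp only [Nat.shiftLeft_eq, pow_one]
    ring
theorem encR_half {ds : List Nat} (h : ∀ d ∈ ds, d &&& 1 = 0) :
    encR (ds.map (· >>> 1)) = encR ds >>> 1 := by
  induction ds with
  | nil => simp [encR]
  | cons d ds ih =>
    have hd : d % 2 = 0 := by rw [← Nat.and_one_is_mod]; exact h d (by simp)
    have ihh := ih (fun v hv => h v (by simp [hv]))
    have he2 : encR ds % 2 = 0 := by
      cases ds with
      | nil => simp [encR]
      | cons e es =>
        have : e % 2 = 0 := by
          rw [← Nat.and_one_is_mod]; exact h e (by simp)
        simp only [encR]; omega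
    simp only [List.map_cons, encR, ihh]
    simp only [Nat.shiftRight_one]
    omega
-- ---- orMerge facts ----
theorem orMerge_nil_right (ds : List Nat) : orMerge ds [] = ds := by
  cases ds <;> rfl
theorem orMerge_length : ∀ (ds es : List Nat),
    (orMerge ds es).length = max ds.length es.length
  | [], es => by simp [orMerge]
  | d :: ds, [] => by simp [orMerge]
  | d :: ds, e :: es => by
    simp only [orMerge, List.length_cons, orMerge_length ds es]
    omega
theorem orMerge_bounds : ∀ {ds es : List Nat}, (∀ d ∈ ds, 1 ≤ d ∧ d < 128) →
    (∀ d ∈ es, 1 ≤ d ∧ d < 128) → ∀ d ∈ orMerge ds es, 1 ≤ d ∧ d < 128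
  | [], es, _, hes => by simpa [orMerge] using hes
  | d :: ds, [], hds, _ => by simpa [orMerge] using hds
  | d :: ds, e :: es, hds, hes => by
    intro v hv
    simp only [orMerge, List.mem_cons] at hv
    rcases hv with rfl | hv
    · have h1 := hds d (by simp)
      have h2 := hes e (by simp)
      constructor
      · have : d ≤ d ||| e := Nat.left_le_or
        omega
      · have : d ||| e < 2 ^ 7 := Nat.or_lt_two_pow (by omega) (by omega)
        omega
    · exact orMerge_bounds (fun v hv => hds v (by simp [hv])) (fun v hv => hes v (by simp [hv])) v hv
theorem filter_orMerge : ∀ {u rl : List Nat} (k : Nat), (∀ d ∈ u, d ≠ 0) →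
    (∀ d ∈ rl, d ≠ 0) →
    (orMerge (u ++ List.replicate k 0) rl).filter (fun v => decide (v ≠ 0)) = orMerge u rl
  | u, [], k, hu, _ => by
    rw [orMerge_nil_right, orMerge_nil_right, List.filter_append]
    have h1 : u.filter (fun v => decide (v ≠ 0)) = u :=
      List.filter_eq_self.mpr (fun v hv => by simpa using hu v hv)
    have h2 : (List.replicate k (0:Nat)).filter (fun v => decide (v ≠ 0)) = [] := by
      simp [List.filter_eq_nil_iff]
    rw [h1, h2, List.append_nil]
  | [], e :: es, k, _, hrl => by
    cases k with
    | zero =>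
      simp only [List.replicate_zero, List.nil_append]
      have : ∀ l : List Nat, (∀ d ∈ l, d ≠ 0) → l.filter (fun v => decide (v ≠ 0)) = l :=
        fun l hl => List.filter_eq_self.mpr (fun v hv => by simpa using hl v hv)
      exact this (orMerge [] (e :: es)) (by simpa [orMerge] using hrl)
    | succ k =>
      have he : e ≠ 0 := hrl e (by simp)
      simp only [List.replicate_succ, List.nil_append, orMerge, List.filter_cons]
      rw [show ((0:Nat) ||| e) = e by simp, if_pos (by simpa using he)]
      have := filter_orMerge (u := []) (rl := es) k (by simp) (fun v hv => hrl v (by simp [hv]))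
      simpa [orMerge] using this
  | d :: ds, e :: es, k, hu, hrl => by
    have hd : d ≠ 0 := hu d (by simp)
    have he : e ≠ 0 := hrl e (by simp)
    have hde : d ||| e ≠ 0 := by
      have : d ≤ d ||| e := Nat.left_le_or
      omega
    have hrec := filter_orMerge (u := ds) (rl := es) k (fun v hv => hu v (by simp [hv]))
      (fun v hv => hrl v (by simp [hv]))
    simp only [List.cons_append, orMerge, List.filter_cons]
    rw [if_pos (by simpa using hde), hrec]
-- ---- Array/List bridges ----
theorem arr_getD (c : Array Nat) (i : Nat) : c.getD i 0 = c.toList.getD i 0 := by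
  by_cases h : i < c.size
  · simp [Array.getD, h]
  · simp [Array.getD, h, List.getD_eq_default _ _ (by simpa using Nat.le_of_not_lt h)]
-- ---- A's collides vs a single AND against the bitboard ----
theorem collidesA_iff (c : Array Nat) : ∀ (rl : List Nat) (i : Nat),
    (collidesA c rl i = true ↔
      ∃ k, k < rl.length ∧ i + k < c.size ∧ c.toList.getD (i + k) 0 &&& rl.getD k 0 ≠ 0) := by
  intro rl
  induction rl with
  | nil => intro i; simp [collidesA]
  | cons rr rest ih =>
    intro i
    rw [collidesA]
    split_ifs with h
    · constructor
      · intro _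
        exact ⟨0, by simp, by simpa using h.1, by simpa [← arr_getD] using h.2⟩
      · intro _; rfl
    · rw [ih (i + 1)]
      constructor
      · rintro ⟨k, hk, hlt, hne⟩
        refine ⟨k + 1, by simpa using Nat.succ_lt_succ hk, ?_, ?_⟩
        · rw [show i + (k + 1) = i + 1 + k by omega]; exact hlt
        · rw [show i + (k + 1) = i + 1 + k by omega, List.getD_cons_succ]; exact hne
      · rintro ⟨k, hk, hlt, hne⟩
        cases k with
        | zero =>
          exact absurd ⟨by simpa using hlt, by simpa [arr_getD] using hne⟩ h
        | succ k =>
          refine ⟨k, by simpa using Nat.lt_of_succ_lt_succ hk, ?_, ?_⟩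
          · rw [show i + 1 + k = i + (k + 1) by omega]; exact hlt
          · rw [show i + 1 + k = i + (k + 1) by omega]
            rw [List.getD_cons_succ] at hne; exact hne
theorem land_shift_iff {rl : List Nat} (hrl : ∀ d ∈ rl, d < 128) :
    ∀ (p : Nat) (ds : List Nat), (∀ d ∈ ds, d < 128) →
    (encR ds &&& (encR rl <<< (7 * p)) ≠ 0 ↔
      ∃ k, k < rl.length ∧ p + k < ds.length ∧ ds.getD (p + k) 0 &&& rl.getD k 0 ≠ 0) := by
  intro p
  induction p with
  | zero =>
    intro ds hds
    rw [Nat.mul_zero, Nat.shiftLeft_zero, land_encR hds hrl]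
    rw [Ne, encR_eq_zero_iff]
    push_neg
    constructor
    · rintro ⟨v, hv, hv0⟩
      obtain ⟨k, hk, rfl⟩ := List.mem_iff_getElem.mp hv
      rw [List.length_zipWith] at hk
      refine ⟨k, by omega, by omega, ?_⟩
      have : (List.zipWith (· &&& ·) ds rl)[k] = ds[k]'(by omega) &&& rl[k]'(by omega) :=
        List.getElem_zipWith
      rw [this] at hv0
      rw [Nat.zero_add, List.getD_eq_getElem ds 0 (by omega : k < ds.length),
        List.getD_eq_getElem rl 0 (by omega : k < rl.length)]
      exact hv0
    · rintro ⟨k, hk, hkd, hne⟩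
      refine ⟨(List.zipWith (· &&& ·) ds rl)[k]'(by rw [List.length_zipWith]; omega), List.getElem_mem _, ?_⟩
      have : (List.zipWith (· &&& ·) ds rl)[k]'(by rw [List.length_zipWith]; omega) =
          ds[k]'(by omega) &&& rl[k]'(by omega) := List.getElem_zipWith
      rw [this]
      rw [Nat.zero_add, List.getD_eq_getElem ds 0 (by omega : k < ds.length),
        List.getD_eq_getElem rl 0 (by omega : k < rl.length)] at hne
      exact hne
  | succ p ih =>
    intro ds hds
    cases ds with
    | nil =>
      simp [encR]
    | cons d ds =>
      have hd : d < 128 := hds d (by simp)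
      have hsh : encR rl <<< (7 * (p + 1)) = 0 + 2 ^ 7 * (encR rl <<< (7 * p)) := by
        simp only [Nat.shiftLeft_eq, Nat.zero_add]
        rw [← Nat.mul_assoc, Nat.mul_comm (2 ^ 7), Nat.mul_assoc, ← pow_add]
        ring_nf
      have hsplit : encR (d :: ds) = d + 2 ^ 7 * encR ds := by simp [encR]
      rw [hsplit, hsh, digit_split_land (by omega) (by omega)]
      have h0 : d &&& 0 = 0 := Nat.and_zero d
      rw [h0, Nat.zero_add]
      have h2 : (2:Nat) ^ 7 * (encR ds &&& (encR rl <<< (7 * p))) ≠ 0 ↔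
          encR ds &&& (encR rl <<< (7 * p)) ≠ 0 := by
        constructor <;> intro h <;> simp_all
      rw [h2, ih ds (fun v hv => hds v (by simp [hv]))]
      constructor
      · rintro ⟨k, hk, hlt, hne⟩
        exact ⟨k, hk, by simp only [List.length_cons]; omega,
          by rw [show p + 1 + k = (p + k) + 1 by omega, List.getD_cons_succ]; exact hne⟩
      · rintro ⟨k, hk, hlt, hne⟩
        refine ⟨k, hk, by simp only [List.length_cons] at hlt; omega, ?_⟩
        rw [show p + 1 + k = (p + k) + 1 by omega, List.getD_cons_succ] at hne; exact hne
theorem collide_bridge {cp : Array Nat} {ds rl : List Nat}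
    (hpad : cp.toList = ds ++ [0, 0, 0]) (hds : ∀ d ∈ ds, d < 128)
    (hrl : ∀ d ∈ rl, d < 128) (p : Nat) :
    (collidesA cp rl p = true ↔ encR ds &&& (encR rl <<< (7 * p)) ≠ 0) := by
  rw [collidesA_iff, land_shift_iff hrl p ds hds]
  have hsize : cp.size = ds.length + 3 := by
    rw [← Array.length_toList, hpad]; simp
  constructor
  · rintro ⟨k, hk, hlt, hne⟩
    refine ⟨k, hk, ?_, ?_⟩
    · by_contra hge
      rw [hpad] at hne
      have : (ds ++ [0, 0, 0]).getD (p + k) 0 = 0 := by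
        rcases Nat.lt_or_ge (p + k) (ds.length + 3) with h | h
        · have h1 : ds.length ≤ p + k := by omega
          rw [List.getD_append_right ds [0,0,0] 0 _ h1]
          have : p + k - ds.length < 3 := by omega
          interval_cases (p + k - ds.length) <;> rfl
        · exact List.getD_eq_default _ _ (by simpa using h)
      exact hne (by rw [this]; exact Nat.zero_and _)
    · intro h0
      rw [hpad] at hne
      by_cases hin : p + k < ds.length
      · rw [List.getD_append ds [0,0,0] 0 _ (by omega)] at hne
        exact hne h0
      · have : (ds ++ [0,0,0]).getD (p + k) 0 = 0 := by
          rw [List.getD_append_right ds [0,0,0] 0 _ (by omega)]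
          have h3 : p + k - ds.length < 3 := by omega
          interval_cases (p + k - ds.length) <;> rfl
        exact hne (by rw [this]; exact Nat.zero_and _)
  · rintro ⟨k, hk, hlt, hne⟩
    refine ⟨k, hk, by omega, ?_⟩
    rw [hpad, List.getD_append ds [0,0,0] 0 _ (by omega)]
    exact hne
-- ---- wall masks ----
theorem zip_replicate64 : ∀ (rl : List Nat) (n : Nat), rl.length ≤ n →
    List.zipWith (· &&& ·) rl (List.replicate n 64) = rl.map (· &&& 64)
  | [], n, _ => by simp
  | d :: ds, n + 1, h => by
    simp only [List.replicate_succ, List.zipWith_cons_cons, List.map_cons]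
    rw [zip_replicate64 ds n (by simpa using h)]

theorem zip_replicate1 : ∀ (rl : List Nat) (n : Nat), rl.length ≤ n →
    List.zipWith (· &&& ·) rl (List.replicate n 1) = rl.map (· &&& 1)
  | [], n, _ => by simp
  | d :: ds, n + 1, h => by
    simp only [List.replicate_succ, List.zipWith_cons_cons, List.map_cons]
    rw [zip_replicate1 ds n (by simpa using h)]

theorem wallL_bridge {rl : List Nat} (hrl : ∀ d ∈ rl, d < 128) (hlen : rl.length ≤ 4) :
    ((rl.any fun rr => rr &&& 64 ≠ 0) = false ↔ encR rl &&& wallL = 0) := by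
  have hw : wallL = encR (List.replicate 4 64) := by decide
  rw [hw, land_encR hrl (by decide), zip_replicate64 rl 4 hlen, encR_eq_zero_iff]
  simp [List.any_eq_false]
theorem wallR_bridge {rl : List Nat} (hrl : ∀ d ∈ rl, d < 128) (hlen : rl.length ≤ 4) :
    ((rl.any fun rr => rr &&& 1 ≠ 0) = false ↔ encR rl &&& wallR = 0) := by
  have hw : wallR = encR (List.replicate 4 1) := by decide
  rw [hw, land_encR hrl (by decide), zip_replicate1 rl 4 hlen, encR_eq_zero_iff]
  simp [List.any_eq_false]
-- ---- the fall loop ----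
theorem and127_ne : ∀ d < 128, 1 ≤ d → 127 &&& d ≠ 0 := by decide

theorem shl_bound : ∀ d < 128, d &&& 64 = 0 → 1 ≤ d → 1 ≤ d <<< 1 ∧ d <<< 1 < 128 := by decide

theorem shr_bound : ∀ d < 128, d &&& 1 = 0 → 1 ≤ d → 1 ≤ d >>> 1 ∧ d >>> 1 < 128 := by decide

theorem floor_collide {cp : Array Nat} {ds rl : List Nat} {L s : Nat}
    (hpad : cp.toList = ds ++ [0, 0, 0]) (hfloor : ds.getD 0 0 = 127)
    (hR : RockInv L rl s) : collidesA cp rl 0 = true := by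
  obtain ⟨-, hlen, hL1, -, hdig⟩ := hR
  cases rl with
  | nil => simp at hlen; omega
  | cons d rest =>
    have hd := hdig d (by simp)
    have hds0 : 0 < ds.length := by
      by_contra h0
      have : ds = [] := List.eq_nil_of_length_eq_zero (by omega)
      rw [this] at hfloor
      simp [List.getD] at hfloor
    have hsize : cp.size = ds.length + 3 := by
      rw [← Array.length_toList, hpad]; simp
    rw [collidesA, if_pos]
    refine ⟨by omega, ?_⟩
    rw [arr_getD, hpad, List.getD_append ds [0,0,0] 0 _ hds0, hfloor]
    exact and127_ne d hd.2 hd.1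
theorem jet_bridge {cp : Array Nat} {ds rl : List Nat} {C L s : Nat}
    (hpad : cp.toList = ds ++ [0, 0, 0]) (hC : C = encR ds)
    (hds : ∀ d ∈ ds, 1 ≤ d ∧ d < 128) (hR : RockInv L rl s) (ch : Char) (rp : Nat) :
    RockInv L
      (if ch = '<' then
        if (¬ (rl.any fun rr => rr &&& 64 ≠ 0) = true) ∧
            ¬ collidesA cp (rl.map (· <<< 1)) rp = true then rl.map (· <<< 1)
        else rl
      else if ch = '>' then
        if (¬ (rl.any fun rr => rr &&& 1 ≠ 0) = true) ∧
            ¬ collidesA cp (rl.map (· >>> 1)) rp = true then rl.map (· >>> 1)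
        else rl
      else rl)
      (if ch = '<' then
        if s &&& wallL = 0 ∧ C &&& (s <<< 1 <<< (7 * rp)) = 0 then s <<< 1 else s
      else if ch = '>' then
        if s &&& wallR = 0 ∧ C &&& (s >>> 1 <<< (7 * rp)) = 0 then s >>> 1 else s
      else s) := by
  obtain ⟨hs, hlen, hL1, hL4, hdig⟩ := hR
  have hds' : ∀ d ∈ ds, d < 128 := fun d hd => (hds d hd).2
  have hrl128 : ∀ d ∈ rl, d < 128 := fun d hd => (hdig d hd).2
  by_cases hch1 : ch = '<'
  · rw [if_pos hch1, if_pos hch1]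
    by_cases h1 : (rl.any fun rr => rr &&& 64 ≠ 0) = false
    · have h64 : ∀ d ∈ rl, d &&& 64 = 0 := by
        intro d hd
        simpa using List.any_eq_false.mp h1 d hd
      have hmb : ∀ d ∈ rl.map (· <<< 1), 1 ≤ d ∧ d < 128 := by
        intro v hv
        obtain ⟨d, hd, rfl⟩ := List.mem_map.mp hv
        have h := hdig d hd
        exact shl_bound d h.2 (h64 d hd) h.1
      have henc : encR (rl.map (· <<< 1)) = s <<< 1 := by rw [encR_double, hs]
      have hcoll : collidesA cp (rl.map (· <<< 1)) rp = true ↔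
          C &&& (s <<< 1 <<< (7 * rp)) ≠ 0 := by
        rw [collide_bridge hpad hds' (fun v hv => (hmb v hv).2) rp, henc, hC]
      have hcond : ((¬ (rl.any fun rr => rr &&& 64 ≠ 0) = true) ∧
          ¬ collidesA cp (rl.map (· <<< 1)) rp = true) ↔
          (s &&& wallL = 0 ∧ C &&& (s <<< 1 <<< (7 * rp)) = 0) := by
        constructor
        · rintro ⟨-, h2⟩
          refine ⟨by rw [hs]; exact (wallL_bridge hrl128 (by omega)).mp h1, ?_⟩
          by_contra hne
          exact h2 (hcoll.mpr hne)
        · rintro ⟨-, h2⟩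
          exact ⟨by intro hcon; rw [h1] at hcon; exact Bool.false_ne_true hcon,
            fun hc => (hcoll.mp hc) h2⟩
      by_cases hA : (¬ (rl.any fun rr => rr &&& 64 ≠ 0) = true) ∧
          ¬ collidesA cp (rl.map (· <<< 1)) rp = true
      · rw [if_pos hA, if_pos (hcond.mp hA)]
        exact ⟨henc.symm, by simpa using hlen, hL1, hL4, hmb⟩
      · rw [if_neg hA, if_neg (fun hB => hA (hcond.mpr hB))]
        exact ⟨hs, hlen, hL1, hL4, hdig⟩
    · have h1' : (rl.any fun rr => rr &&& 64 ≠ 0) = true := by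
        cases h : (rl.any fun rr => rr &&& 64 ≠ 0) with
        | false => exact absurd h h1
        | true => rfl
      have hwall : ¬ (s &&& wallL = 0) := by
        intro h0
        rw [hs] at h0
        exact h1 ((wallL_bridge hrl128 (by omega)).mpr h0)
      rw [if_neg (fun hA => hA.1 h1'), if_neg (fun hB => hwall hB.1)]
      exact ⟨hs, hlen, hL1, hL4, hdig⟩
  · by_cases hch2 : ch = '>'
    · rw [if_neg hch1, if_neg hch1, if_pos hch2, if_pos hch2]
      by_cases h1 : (rl.any fun rr => rr &&& 1 ≠ 0) = false
      · have h0b : ∀ d ∈ rl, d &&& 1 = 0 := by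
          intro d hd
          simpa using List.any_eq_false.mp h1 d hd
        have hmb : ∀ d ∈ rl.map (· >>> 1), 1 ≤ d ∧ d < 128 := by
          intro v hv
          obtain ⟨d, hd, rfl⟩ := List.mem_map.mp hv
          have h := hdig d hd
          exact shr_bound d h.2 (h0b d hd) h.1
        have henc : encR (rl.map (· >>> 1)) = s >>> 1 := by rw [encR_half h0b, hs]
        have hcoll : collidesA cp (rl.map (· >>> 1)) rp = true ↔
            C &&& (s >>> 1 <<< (7 * rp)) ≠ 0 := by
          rw [collide_bridge hpad hds' (fun v hv => (hmb v hv).2) rp, henc, hC]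
        have hcond : ((¬ (rl.any fun rr => rr &&& 1 ≠ 0) = true) ∧
            ¬ collidesA cp (rl.map (· >>> 1)) rp = true) ↔
            (s &&& wallR = 0 ∧ C &&& (s >>> 1 <<< (7 * rp)) = 0) := by
          constructor
          · rintro ⟨-, h2⟩
            refine ⟨by rw [hs]; exact (wallR_bridge hrl128 (by omega)).mp h1, ?_⟩
            by_contra hne
            exact h2 (hcoll.mpr hne)
          · rintro ⟨-, h2⟩
            exact ⟨by intro hcon; rw [h1] at hcon; exact Bool.false_ne_true hcon,
            fun hc => (hcoll.mp hc) h2⟩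
        by_cases hA : (¬ (rl.any fun rr => rr &&& 1 ≠ 0) = true) ∧
            ¬ collidesA cp (rl.map (· >>> 1)) rp = true
        · rw [if_pos hA, if_pos (hcond.mp hA)]
          exact ⟨henc.symm, by simpa using hlen, hL1, hL4, hmb⟩
        · rw [if_neg hA, if_neg (fun hB => hA (hcond.mpr hB))]
          exact ⟨hs, hlen, hL1, hL4, hdig⟩
      · have h1' : (rl.any fun rr => rr &&& 1 ≠ 0) = true := by
          cases h : (rl.any fun rr => rr &&& 1 ≠ 0) with
          | false => exact absurd h h1
          | true => rfl
        have hwall : ¬ (s &&& wallR = 0) := by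
          intro h0
          rw [hs] at h0
          exact h1 ((wallR_bridge hrl128 (by omega)).mpr h0)
        rw [if_neg (fun hA => hA.1 h1'), if_neg (fun hB => hwall hB.1)]
        exact ⟨hs, hlen, hL1, hL4, hdig⟩
    · rw [if_neg hch1, if_neg hch1, if_neg hch2, if_neg hch2]
      exact ⟨hs, hlen, hL1, hL4, hdig⟩
theorem fall_bridge {x : Array Char} {cp : Array Nat} {ds : List Nat} {C : Nat}
    (hpad : cp.toList = ds ++ [0, 0, 0]) (hC : C = encR ds)
    (hds : ∀ d ∈ ds, 1 ≤ d ∧ d < 128) (hfloor : ds.getD 0 0 = 127) {L : Nat} :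
    ∀ (rp : Nat), 1 ≤ rp → ∀ (rl : List Nat) (s : Nat) (xi : Nat), RockInv L rl s →
      RockInv L (fallA x cp rl rp xi).1 (fallB x C s rp xi).1 ∧
      (fallA x cp rl rp xi).2.1 = (fallB x C s rp xi).2.1 ∧
      (fallA x cp rl rp xi).2.2 = (fallB x C s rp xi).2.2 ∧
      1 ≤ (fallA x cp rl rp xi).2.1 ∧ (fallA x cp rl rp xi).2.1 ≤ rp ∧
      collidesA cp (fallA x cp rl rp xi).1 ((fallA x cp rl rp xi).2.1 - 1) = true := by
  intro rp
  induction rp with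
  | zero => omega
  | succ rp' ih =>
    intro _ rl s xi hR
    have hjet := jet_bridge hpad hC hds hR (x.getD (xi % x.size) ' ') rp'.succ
    rw [fallA, fallB]
    simp only []
    set rl1 := (if x.getD (xi % x.size) ' ' = '<' then
        if (¬ (rl.any fun rr => rr &&& 64 ≠ 0) = true) ∧
            ¬ collidesA cp (rl.map (· <<< 1)) (rp' + 1) = true then rl.map (· <<< 1)
        else rl
      else if x.getD (xi % x.size) ' ' = '>' then
        if (¬ (rl.any fun rr => rr &&& 1 ≠ 0) = true) ∧
            ¬ collidesA cp (rl.map (· >>> 1)) (rp' + 1) = true then rl.map (· >>> 1)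
        else rl
      else rl) with hrl1
    set s1 := (if x.getD (xi % x.size) ' ' = '<' then
        if s &&& wallL = 0 ∧ C &&& (s <<< 1 <<< (7 * (rp' + 1))) = 0 then s <<< 1 else s
      else if x.getD (xi % x.size) ' ' = '>' then
        if s &&& wallR = 0 ∧ C &&& (s >>> 1 <<< (7 * (rp' + 1))) = 0 then s >>> 1 else s
      else s) with hs1
    have hR1 : RockInv L rl1 s1 := hjet
    have hds' : ∀ d ∈ ds, d < 128 := fun d hd => (hds d hd).2
    have hcoll1 : collidesA cp rl1 rp' = true ↔ C &&& (s1 <<< (7 * rp')) ≠ 0 := by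
      rw [collide_bridge hpad hds' (fun v hv => (hR1.2.2.2.2 v hv).2) rp', hR1.1, hC]
    by_cases hc : collidesA cp rl1 rp' = true
    · rw [if_pos hc, if_pos (by simpa using hcoll1.mp hc)]
      exact ⟨hR1, rfl, rfl, Nat.succ_le_succ (Nat.zero_le _), Nat.le_refl _,
        by simpa using hc⟩
    · rw [if_neg hc, if_neg (by simpa using (fun hne => hc (hcoll1.mpr hne)))]
      rcases Nat.eq_zero_or_pos rp' with h0 | h1
      · exfalso
        exact hc (h0 ▸ floor_collide hpad hfloor hR1)
      · have := ih h1 rl1 s1 (xi + 1) hR1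
        exact ⟨this.1, this.2.1, this.2.2.1, this.2.2.2.1, by omega, this.2.2.2.2.2⟩
-- ---- settling ----
theorem take_len_succ {α : Type} (u w : List α) :
    (u ++ w).take (u.length + 1) = u ++ w.take 1 := by
  rw [List.take_append, List.take_of_length_le (by omega)]
  simp

theorem drop_len_succ {α : Type} (u w : List α) :
    (u ++ w).drop (u.length + 1) = w.drop 1 := by
  rw [List.drop_append, List.drop_eq_nil_of_le (by omega)]
  simp

theorem settleA_toList : ∀ (rl : List Nat) (c : Array Nat) (i : Nat), i ≤ c.size →
    (settleA c rl i).toList = c.toList.take i ++ orMerge (c.toList.drop i) rl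
  | [], c, i, hi => by
    rw [settleA, orMerge_nil_right, List.take_append_drop]
  | rr :: rest, c, i, hi => by
    rw [settleA]
    by_cases h : i < c.size
    · rw [if_pos h]
      have hlen : i < c.toList.length := by simpa using h
      have hset : (c.set! i (c.getD i 0 ||| rr)).toList =
          c.toList.take i ++ (c.toList[i] ||| rr) :: c.toList.drop (i + 1) := by
        simp only [Array.set!, Array.toList_setIfInBounds, arr_getD]
        rw [List.getD_eq_getElem _ _ hlen]
        exact List.set_eq_take_cons_drop _ hlen
      have hrec := settleA_toList rest (c.set! i (c.getD i 0 ||| rr)) (i + 1)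
        (by simp [Array.set!]; omega)
      rw [hrec, hset]
      have hlt : (c.toList.take i).length = i := by simp; omega
      rw [show i + 1 = (c.toList.take i).length + 1 by rw [hlt], take_len_succ, drop_len_succ]
      rw [List.drop_eq_getElem_cons hlen, orMerge]
      simp [List.append_assoc]
      rw [show min i c.size = i by omega]
    · rw [if_neg h]
      have hieq : i = c.size := by omega
      have hrec := settleA_toList rest (c.push rr) (i + 1) (by simp [Array.size_push]; omega)
      rw [hrec, Array.toList_push]
      have hlen : c.toList.length = i := by simp [hieq]
      subst hlen
      rw [take_len_succ, drop_len_succ, List.take_length, List.drop_length]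
      simp [orMerge]
theorem settle_bridge {cp : Array Nat} {ds rl : List Nat} {C L s rp : Nat}
    (hpad : cp.toList = ds ++ [0, 0, 0]) (hC : C = encR ds)
    (hds : ∀ d ∈ ds, 1 ≤ d ∧ d < 128) (hfloor : ds.getD 0 0 = 127)
    (hR : RockInv L rl s) (hrp1 : 1 ≤ rp) (hrph : rp ≤ ds.length) :
    ChInv ((settleA cp rl rp).filter (fun v => decide (v ≠ 0)))
      (C ||| (s <<< (7 * rp))) (max ds.length (rp + L)) := by
  obtain ⟨hs, hlen, hL1, hL4, hdig⟩ := hR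
  have hsize : cp.size = ds.length + 3 := by
    rw [← Array.length_toList, hpad]; simp
  have hsettle := settleA_toList rl cp rp (by omega)
  rw [hpad] at hsettle
  rw [List.take_append_of_le_length (by omega), List.drop_append_of_le_length (by omega)]
    at hsettle
  have hnew : ((settleA cp rl rp).filter (fun v => decide (v ≠ 0))).toList =
      ds.take rp ++ orMerge (ds.drop rp) rl := by
    rw [Array.toList_filter, hsettle, List.filter_append]
    have h1 : (ds.take rp).filter (fun v => decide (v ≠ 0)) = ds.take rp :=
      List.filter_eq_self.mpr (fun v hv => by
        have := (hds v (List.mem_of_mem_take hv)).1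
        simp; omega)
    have h2 : (orMerge (ds.drop rp ++ [0, 0, 0]) rl).filter (fun v => decide (v ≠ 0)) =
        orMerge (ds.drop rp) rl := by
      have h000 : ([0, 0, 0] : List Nat) = List.replicate 3 0 := rfl
      rw [h000]
      exact filter_orMerge 3
        (fun v hv => by have := (hds v (List.mem_of_mem_drop hv)).1; omega)
        (fun v hv => by have := (hdig v hv).1; omega)
    rw [h1, h2]
  have hdrop : ∀ d ∈ ds.drop rp, 1 ≤ d ∧ d < 128 :=
    fun d hd => hds d (List.mem_of_mem_drop hd)
  have htake : ∀ d ∈ ds.take rp, 1 ≤ d ∧ d < 128 :=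
    fun d hd => hds d (List.mem_of_mem_take hd)
  have htklen : (ds.take rp).length = rp := by simp; omega
  refine ⟨?_, ?_, ?_, ?_⟩
  · rw [hnew, encR_append, htklen]
    rw [← lor_orMerge (fun d hd => (hdrop d hd).2) (fun d hd => (hdig d hd).2)]
    have hdsplit : encR ds = encR (ds.take rp) + 128 ^ rp * encR (ds.drop rp) := by
      conv_lhs => rw [← List.take_append_drop rp ds]
      rw [encR_append, htklen]
    have hx : encR (ds.take rp) < 2 ^ (7 * rp) := by
      rw [← pow128_eq]
      have := encR_lt (ds := ds.take rp) (fun d hd => (htake d hd).2)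
      rwa [htklen] at this
    have hshift : s <<< (7 * rp) = 0 + 2 ^ (7 * rp) * encR rl := by
      rw [Nat.shiftLeft_eq, hs, Nat.zero_add, Nat.mul_comm]
    rw [hC, hdsplit, hshift, pow128_eq]
    rw [digit_split_lor hx (by positivity), Nat.or_zero]
  · rw [hnew]
    simp only [List.length_append, htklen, orMerge_length, List.length_drop, hlen]
    omega
  · rw [hnew]
    intro d hd
    rcases List.mem_append.mp hd with h | h
    · exact htake d h
    · exact orMerge_bounds hdrop hdig d h
  · rw [hnew]
    have h0 : 0 < (ds.take rp).length := by omega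
    rw [List.getD_append _ _ _ _ h0]
    rw [List.getD_eq_getElem _ _ h0, List.getElem_take]
    rw [List.getD_eq_getElem _ _ (by omega : 0 < ds.length)] at hfloor
    exact hfloor
-- ---- one rock, the fold, and initialization ----
theorem rock_init (r : Nat) :
    RockInv (rowsB.getD (r % 5) 0) (rockA r) (shapesB.getD (r % 5) 0) := by
  rcases (by omega : r % 5 = 0 ∨ r % 5 = 1 ∨ r % 5 = 2 ∨ r % 5 = 3 ∨ r % 5 = 4)
    with h | h | h | h | h <;>
    simp only [rockA, h, rowsB, shapesB, RockInv] <;> decide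
theorem step_bridge (x : Array Char) (br lr re : Int) (r : Nat) (stA stB)
    (h : SimInv stA stB) : SimInv (stepA x br lr re stA r) (stepB x br lr re stB r) := by
  obtain ⟨c0, xi0, b0, l0, o0⟩ := stA
  obtain ⟨C0, h0, xiB, bB, lB, oB⟩ := stB
  obtain ⟨⟨hC, hh, hdig, hfl⟩, hxi, hb, hl, ho⟩ := h
  simp only [] at hC hh hdig hfl hxi hb hl ho
  subst hxi hb hl ho hh hC
  have hpad : (c0 ++ #[0, 0, 0]).toList = c0.toList ++ [0, 0, 0] := by
    simp [Array.toList_append]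
  have hds' : ∀ d ∈ c0.toList, d < 128 := fun d hd => (hdig d hd).2
  have hsz3 : (c0 ++ #[0, 0, 0]).size = c0.toList.length + 3 := by
    rw [← Array.length_toList, hpad]; simp
  rw [stepA, stepB, hsz3]
  have hfall := fall_bridge (x := x) hpad rfl hdig hfl
    (c0.toList.length + 3) (by omega) (rockA r) (shapesB.getD (r % 5) 0) xi0 (rock_init r)
  obtain ⟨hR', hrp, hxi', hrp1, hrple, hcoll⟩ := hfall
  set frA := fallA x (c0 ++ #[0, 0, 0]) (rockA r) (c0.toList.length + 3) xi0 with hfrA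
  set frB := fallB x (encR c0.toList) (shapesB.getD (r % 5) 0) (c0.toList.length + 3) xi0
    with hfrB
  have hrlb : ∀ v ∈ frA.1, v < 128 := fun v hv => (hR'.2.2.2.2 v hv).2
  have hrph : frA.2.1 ≤ c0.toList.length := by
    have hc2 := (collide_bridge hpad hds' hrlb _).mp hcoll
    obtain ⟨k, -, hlt, -⟩ :=
      (land_shift_iff hrlb (frA.2.1 - 1) c0.toList hds').mp hc2
    omega
  have hsb := settle_bridge hpad rfl hdig hfl hR' hrp1 hrph
  rw [← hrp, ← hxi']
  have hsz : ((settleA (c0 ++ #[0, 0, 0]) frA.1 frA.2.1).filter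
      (fun v => decide (v ≠ 0))).size =
      max c0.toList.length (frA.2.1 + rowsB.getD (r % 5) 0) := by
    rw [← Array.length_toList, ← hsb.2.1]
  exact ⟨hsb, rfl, by rw [hsz], by rw [hsz], by rw [hsz]⟩
theorem fold_bridge (x : Array Char) (br lr re : Int) : ∀ (rs : List Nat) (stA stB),
    SimInv stA stB →
    SimInv (rs.foldl (stepA x br lr re) stA) (rs.foldl (stepB x br lr re) stB)
  | [], stA, stB, h => h
  | r :: rs, stA, stB, h =>
    fold_bridge x br lr re rs _ _ (step_bridge x br lr re r stA stB h)
theorem inv_init : SimInv (#[127], 0, 0, 0, 0) (127, 1, 0, 0, 0, 0) := by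
  refine ⟨⟨?_, ?_, ?_, ?_⟩, rfl, rfl, rfl, rfl⟩ <;> decide
-- ===== VERDICT (by name: the statement is the Claim_ definition above) =====
theorem part2_spec : Claim_equal_part2 := by
  intro x _ _
  unfold Spec_part2 part2 part2_alt
  have h := fold_bridge x.toList.toArray 175 1730
    (PySem.Int.mod (1000000000000 - 175) 1730)
    (List.range ((175 + 1730 + PySem.Int.mod (1000000000000 - 175) 1730 : Int)).toNat)
    (#[127], 0, 0, 0, 0) (127, 1, 0, 0, 0, 0) inv_init
  obtain ⟨-, -, hb, hl, ho⟩ := h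
  simp only []
  rw [hb, hl, ho]
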